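-- pv_equiv track=rewrite | github.com/phenobarbital/ai-parrot | packages/ai-parrot/src/parrot/pageindex/utils.py | page_list_to_group_text
-- ===== SOURCE A (Python) =====
-- import math
--
-- def page_list_to_group_text(
--     page_contents: list[str],
--     token_lengths: list[int],
--     max_tokens: int = 20000,
--     overlap_page: int = 1,
-- ) -> list[str]:
--     """Split page contents into groups respecting token limits."""
--     num_tokens = sum(token_lengths)
--
--     if num_tokens <= max_tokens:
--         return ["".join(page_contents)]
--
--     subsets: list[str] = []
--     current_subset: list[str] = []
--     current_token_count = 0
--
--     expected_parts_num = math.ceil(num_tokens / max_tokens)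
--     average_tokens_per_part = math.ceil(
--         ((num_tokens / expected_parts_num) + max_tokens) / 2
--     )
--
--     for i, (page_content, page_tokens) in enumerate(
--         zip(page_contents, token_lengths)
--     ):
--         if current_token_count + page_tokens > average_tokens_per_part:
--             subsets.append("".join(current_subset))
--             overlap_start = max(i - overlap_page, 0)
--             current_subset = list(page_contents[overlap_start:i])
--             current_token_count = sum(token_lengths[overlap_start:i])
--
--         current_subset.append(page_content)
--         current_token_count += page_tokens
--
--     if current_subset:
--         subsets.append("".join(current_subset))
--
--     return subsets
-- ===== SOURCE B (Python) =====
-- import math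
--
--
-- def page_list_to_group_text(
--     page_contents: list[str],
--     token_lengths: list[int],
--     max_tokens: int = 20000,
--     overlap_page: int = 1,
-- ) -> list[str]:
--     """Prefix-sum variant: an outer loop emits one group per iteration, an inner
--     search on the prefix-sum table finds each group boundary directly."""
--     num_tokens = sum(token_lengths)
--     if num_tokens <= max_tokens:
--         return ["".join(page_contents)]
--
--     expected_parts_num = math.ceil(num_tokens / max_tokens)
--     average_tokens_per_part = math.ceil(
--         ((num_tokens / expected_parts_num) + max_tokens) / 2
--     )
--
--     n = min(len(page_contents), len(token_lengths))
--     pre = [0]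
--     s = 0
--     for t in token_lengths[:n]:
--         s += t
--         pre.append(s)
--
--     out: list[str] = []
--     start = 0
--     i = 0
--     while True:
--         j = i
--         while j < n and pre[j + 1] - pre[start] <= average_tokens_per_part:
--             j += 1
--         if j < n:
--             out.append("".join(page_contents[start:j]))
--             start = min(max(j - overlap_page, 0), j)
--             i = j + 1
--         else:
--             if n > 0:
--                 out.append("".join(page_contents[start:n]))
--             return out
-- ===== Notes on version B (the rewrite author's own statement) =====
-- stated objective: alternative
-- what changed: B builds a prefix-sum table of the token lengths once and replaces A's per-page stateful accumulation (growing string lists, re-summed overlap slices) by an outer loop that emits one whole group per iteration, locating each boundary by an inner search on prefix-sum differences and joining each page slice once.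
import Mathlib
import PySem

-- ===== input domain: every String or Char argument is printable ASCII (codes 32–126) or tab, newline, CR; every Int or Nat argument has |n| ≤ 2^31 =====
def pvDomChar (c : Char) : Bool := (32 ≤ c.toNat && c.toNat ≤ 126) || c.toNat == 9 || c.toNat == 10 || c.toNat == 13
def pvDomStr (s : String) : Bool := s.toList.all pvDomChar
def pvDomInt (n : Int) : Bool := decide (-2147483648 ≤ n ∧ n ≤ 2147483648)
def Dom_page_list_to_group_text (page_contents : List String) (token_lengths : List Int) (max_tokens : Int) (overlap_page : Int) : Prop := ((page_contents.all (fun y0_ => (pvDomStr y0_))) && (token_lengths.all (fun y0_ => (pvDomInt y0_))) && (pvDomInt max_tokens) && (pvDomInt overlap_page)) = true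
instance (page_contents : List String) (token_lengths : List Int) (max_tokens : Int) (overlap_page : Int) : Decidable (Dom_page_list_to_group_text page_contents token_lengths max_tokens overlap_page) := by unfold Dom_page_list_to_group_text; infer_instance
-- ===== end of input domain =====

-- B replaces A's per-page stateful accumulation by a prefix-sum table and an outer
-- loop that emits one whole group per iteration via an inner boundary search;
-- an alternative decomposition, not claimed faster.


-- ===== PORT A =====
-- "".join(l)
def pvJoin (l : List String) : String := PySem.Str.join "" l

-- one iteration of A's for-loop: state = (subsets, current_subset, current_token_count),
-- element = (i, (page_content, page_tokens))
def pvStepA (pages : List String) (lens : List Int) (avg ov : Int)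
    (s : List String × List String × Int) (p : Int × String × Int) :
    List String × List String × Int :=
  let s :=
    if avg < s.2.2 + p.2.2 then
      (s.1 ++ [pvJoin s.2.1],
       PySem.List.slice pages (some (max (p.1 - ov) 0)) (some p.1),
       (PySem.List.slice lens (some (max (p.1 - ov) 0)) (some p.1)).sum)
    else s
  (s.1, s.2.1 ++ [p.2.1], s.2.2 + p.2.2)

-- the two math.ceil computations; exact rational arithmetic models the float expressions
def pvAvg (num max_tokens : Int) : Int :=
  let e : Int := ⌈(num : ℚ) / (max_tokens : ℚ)⌉
  ⌈(((num : ℚ) / (e : ℚ)) + (max_tokens : ℚ)) / 2⌉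

def page_list_to_group_text (page_contents : List String) (token_lengths : List Int) (max_tokens : Int) (overlap_page : Int) : List String :=
  let num_tokens := token_lengths.sum
  if num_tokens ≤ max_tokens then [pvJoin page_contents]
  else
    let avg := pvAvg num_tokens max_tokens
    let st := (PySem.List.enumerate (page_contents.zip token_lengths) 0).foldl
      (pvStepA page_contents token_lengths avg overlap_page) ([], [], 0)
    if st.2.1 ≠ [] then st.1 ++ [pvJoin st.2.1] else st.1

-- ===== PORT B =====
-- Source B's pre-building loop "s += t; pre.append(s)" as the obvious structural recursion
-- (the returned list is the appended tail; the caller conses the initial 0)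
def pvScan (s : Int) : List Int → List Int
  | [] => []
  | t :: ts => (s + t) :: pvScan (s + t) ts

-- Source B's inner while loop: first j ≥ i with j = n or pre[j+1] - pre[start] > avg
-- (pre.getD _ 0 = Python's pre[_]: all indices used are in range, pre has length n+1)
def pvFind (pre : List Int) (n : Nat) (avg : Int) (start j : Nat) : Nat :=
  if h : j < n ∧ pre.getD (j + 1) 0 - pre.getD start 0 ≤ avg then
    pvFind pre n avg start (j + 1)
  else j
termination_by n - j
decreasing_by omega

-- the inner search never moves left (termination measure of the outer loop)
theorem pvFind_ge (pre : List Int) (n : Nat) (avg : Int) (start j : Nat) :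
    j ≤ pvFind pre n avg start j := by
  rw [pvFind]
  split
  · exact Nat.le_trans (Nat.le_succ j) (pvFind_ge pre n avg start (j + 1))
  · exact Nat.le_refl j
termination_by n - j
decreasing_by omega

-- Source B's outer while loop, acc = out; the Int clamp min (max (j-ov) 0) j is ≥ 0,
-- so .toNat is exact
def pvGroups (pages : List String) (pre : List Int) (n : Nat) (avg ov : Int)
    (acc : List String) (start i : Nat) : List String :=
  let j := pvFind pre n avg start i
  if h : j < n then
    pvGroups pages pre n avg ov
      (acc ++ [pvJoin (PySem.List.slice pages (some (start : Int)) (some (j : Int)))])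
      ((min (max ((j : Int) - ov) 0) (j : Int)).toNat) (j + 1)
  else
    if 0 < n then
      acc ++ [pvJoin (PySem.List.slice pages (some (start : Int)) (some (n : Int)))]
    else acc
termination_by n - i
decreasing_by
  have := pvFind_ge pre n avg start i
  omega

def page_list_to_group_text_alt (page_contents : List String) (token_lengths : List Int) (max_tokens : Int) (overlap_page : Int) : List String :=
  let num_tokens := token_lengths.sum
  if num_tokens ≤ max_tokens then [pvJoin page_contents]
  else
    let avg := pvAvg num_tokens max_tokens
    let n := min page_contents.length token_lengths.length
    let pre := 0 :: pvScan 0 (token_lengths.take n)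
    pvGroups page_contents pre n avg overlap_page [] 0 0

-- ===== PRECONDITION & SPEC =====
-- Pre_ excludes exactly the inputs on which A raises ZeroDivisionError: past the
-- shortcut, max_tokens = 0 (num_tokens / 0), or max_tokens < 0 with
-- 0 ≤ num_tokens < -max_tokens (then expected_parts_num = ceil(num/max) = 0).
def Pre_page_list_to_group_text (page_contents : List String) (token_lengths : List Int) (max_tokens : Int) (overlap_page : Int) : Prop :=
  token_lengths.sum ≤ max_tokens ∨ 0 < max_tokens ∨
    (max_tokens < 0 ∧ (token_lengths.sum < 0 ∨ -max_tokens ≤ token_lengths.sum))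
instance (page_contents : List String) (token_lengths : List Int) (max_tokens : Int) (overlap_page : Int) : Decidable (Pre_page_list_to_group_text page_contents token_lengths max_tokens overlap_page) := by unfold Pre_page_list_to_group_text; infer_instance

def pvWitness_page_list_to_group_text : List String × List Int × Int × Int :=
  (["ab", "cd", "ef"], [3, 4, 2], 5, 1)

def Spec_page_list_to_group_text (page_contents : List String) (token_lengths : List Int) (max_tokens : Int) (overlap_page : Int) (out : List String) : Prop := out = page_list_to_group_text_alt page_contents token_lengths max_tokens overlap_page
instance (page_contents : List String) (token_lengths : List Int) (max_tokens : Int) (overlap_page : Int) (out : List String) : Decidable (Spec_page_list_to_group_text page_contents token_lengths max_tokens overlap_page out) := by unfold Spec_page_list_to_group_text; infer_instance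

-- ===== CLAIM (what is proved, stated in full; the proofs are below) =====
def Claim_equal_page_list_to_group_text : Prop := ∀ (page_contents : List String) (token_lengths : List Int) (max_tokens : Int) (overlap_page : Int), Dom_page_list_to_group_text page_contents token_lengths max_tokens overlap_page → Pre_page_list_to_group_text page_contents token_lengths max_tokens overlap_page → Spec_page_list_to_group_text page_contents token_lengths max_tokens overlap_page (page_list_to_group_text page_contents token_lengths max_tokens overlap_page)

-- ===== LEMMAS AND PROOFS =====

-- clamping the start of a slice at the stop index does not change the slice
theorem pv_slice_min {α : Type} (xs : List α) (a b : Int) (ha : 0 ≤ a) (hb : 0 ≤ b) :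
    PySem.List.slice xs (some (min a b)) (some b) = PySem.List.slice xs (some a) (some b) := by
  rcases le_total a b with h | h
  · rw [min_eq_left h]
  · rw [min_eq_right h, PySem.List.slice_toNat _ ha hb, PySem.List.slice_toNat _ hb hb]
    have h1 : b.toNat - a.toNat = 0 := by omega
    have h2 : b.toNat - b.toNat = 0 := by omega
    simp [h1]

theorem pv_slice_snoc {α : Type} (xs : List α) (a : Int) (j : Nat) (ha : 0 ≤ a)
    (haj : a ≤ (j : Int)) (hj : j < xs.length) :
    PySem.List.slice xs (some a) (some ((j : Int) + 1)) =
      PySem.List.slice xs (some a) (some (j : Int)) ++ [xs[j]] := by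
  rw [PySem.List.slice_toNat _ ha (by omega), PySem.List.slice_toNat _ ha (by omega)]
  have h1 : ((j : Int) + 1).toNat = j + 1 := by omega
  have h2 : ((j : Int)).toNat = j := by omega
  have h3 : j - a.toNat < (xs.drop a.toNat).length := by
    rw [List.length_drop]; omega
  rw [h1, h2]
  have h4 : j + 1 - a.toNat = (j - a.toNat) + 1 := by omega
  rw [h4, List.take_add_one, List.getElem?_eq_getElem h3]
  have h5 : (xs.drop a.toNat)[j - a.toNat] = xs[j] := by
    rw [List.getElem_drop]
    congr 1; omega
  simp [h5]

theorem pv_slice_nonempty {α : Type} (xs : List α) (a : Int) (n : Nat) (ha : 0 ≤ a)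
    (han : a < (n : Int)) (hn : n ≤ xs.length) :
    PySem.List.slice xs (some a) (some (n : Int)) ≠ [] := by
  rw [PySem.List.slice_toNat _ ha (by omega)]
  apply List.ne_nil_of_length_pos
  rw [List.length_take, List.length_drop]
  omega

theorem pv_slice_zero {α : Type} (xs : List α) :
    PySem.List.slice xs (some (0 : Int)) (some (0 : Int)) = [] := by
  rw [PySem.List.slice_toNat _ le_rfl le_rfl]
  simp

-- pvScan computes the running sums
theorem pv_scan_getD (ts : List Int) : ∀ (s : Int) (k : Nat), k < ts.length →
    (pvScan s ts).getD k 0 = s + (ts.take (k + 1)).sum := by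
  induction ts with
  | nil => intro s k hk; simp at hk
  | cons t ts ih =>
    intro s k hk
    cases k with
    | zero => simp [pvScan]
    | succ m =>
      have hm : m < ts.length := by simpa using hk
      simp only [pvScan, List.getD_cons_succ, List.take_succ_cons, List.sum_cons]
      rw [ih (s + t) m hm]
      ring

-- pre[k] = sum of the first k token lengths, for k ≤ n ≤ lens.length
theorem pv_pre_getD (lens : List Int) (n : Nat) (hn : n ≤ lens.length) (k : Nat)
    (hk : k ≤ n) : (0 :: pvScan 0 (lens.take n)).getD k 0 = (lens.take k).sum := by
  cases k with
  | zero => simp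
  | succ m =>
    have hm : m < (lens.take n).length := by rw [List.length_take]; omega
    rw [List.getD_cons_succ, pv_scan_getD _ 0 m hm, List.take_take]
    have : min (m + 1) n = m + 1 := by omega
    rw [this]
    ring

-- sum of a Python slice lens[a:i] in terms of prefix sums
theorem pv_sum_slice (lens : List Int) (a : Int) (i : Nat) (ha : 0 ≤ a)
    (hi : i ≤ lens.length) :
    (PySem.List.slice lens (some a) (some (i : Int))).sum
      = (lens.take i).sum - (lens.take (min a.toNat i)).sum := by
  rw [PySem.List.slice_toNat _ ha (by omega)]
  have h2 : ((i : Int)).toNat = i := by omega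
  rw [h2]
  rcases le_total i a.toNat with h | h
  · have h0 : i - a.toNat = 0 := by omega
    have hmin : min a.toNat i = i := by omega
    simp [h0, hmin]
  · have hmin : min a.toNat i = a.toNat := by omega
    rw [hmin, ← List.drop_take]
    have := List.sum_take_add_sum_drop (lens.take i) a.toNat
    have htt : (lens.take i).take a.toNat = lens.take a.toNat := by
      rw [List.take_take, Nat.min_eq_left h]
    rw [htt] at this
    omega

-- prefix-sum step
theorem pv_take_succ_sum (lens : List Int) (i : Nat) (hi : i < lens.length) :
    (lens.take (i + 1)).sum = (lens.take i).sum + lens[i] := by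
  rw [List.take_add_one, List.getElem?_eq_getElem hi]
  simp only [Option.toList_some, List.sum_append, List.sum_cons, List.sum_nil, add_zero]

-- unfolding lemmas for the inner search
theorem pv_find_stop (pre : List Int) (n : Nat) (avg : Int) (start j : Nat)
    (h : ¬ (j < n ∧ pre.getD (j + 1) 0 - pre.getD start 0 ≤ avg)) :
    pvFind pre n avg start j = j := by
  rw [pvFind, dif_neg h]

theorem pv_find_step (pre : List Int) (n : Nat) (avg : Int) (start j : Nat)
    (h : j < n ∧ pre.getD (j + 1) 0 - pre.getD start 0 ≤ avg) :
    pvFind pre n avg start j = pvFind pre n avg start (j + 1) := by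
  rw [pvFind, dif_pos h]

-- two outer-loop states with the same boundary search result continue identically
theorem pv_groups_shift (pages : List String) (pre : List Int) (n : Nat) (avg ov : Int)
    (acc : List String) (start i i' : Nat)
    (h : pvFind pre n avg start i = pvFind pre n avg start i') :
    pvGroups pages pre n avg ov acc start i = pvGroups pages pre n avg ov acc start i' := by
  conv_lhs => rw [pvGroups]
  conv_rhs => rw [pvGroups]
  rw [h]

-- the joint invariant: running the remaining n - i iterations of A's loop (with the
-- final flush) from a state whose current subset is pages[start:i] and whose count is
-- the prefix-sum difference equals B's outer loop from (acc, start, i)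
theorem pv_main (pages : List String) (lens : List Int) (avg ov : Int) (k : Nat) :
    ∀ (i start : Nat) (subs : List String),
    i + k = min pages.length lens.length →
    start ≤ i →
    (start < min pages.length lens.length ∨ min pages.length lens.length = 0) →
    (let n := min pages.length lens.length
     let st := (PySem.List.enumerate ((pages.zip lens).drop i) (i : Int)).foldl
        (pvStepA pages lens avg ov)
        (subs, PySem.List.slice pages (some (start : Int)) (some (i : Int)),
         (lens.take i).sum - (lens.take start).sum)
     (if st.2.1 ≠ [] then st.1 ++ [pvJoin st.2.1] else st.1)
       = pvGroups pages (0 :: pvScan 0 (lens.take n)) n avg ov subs start i) := by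
  induction k with
  | zero =>
    intro i start subs hn hsi hsn n st
    have hin : i = n := by omega
    have hnl : n ≤ lens.length := by omega
    have hdz : ((pages.zip lens).drop i) = [] := by
      apply List.drop_eq_nil_of_le
      rw [List.length_zip]; omega
    have hfind : pvFind (0 :: pvScan 0 (lens.take n)) n avg start i = i := by
      apply pv_find_stop
      intro hc
      omega
    simp only [st, hdz, PySem.List.enumerate_nil, List.foldl_nil]
    rw [pvGroups, hfind]
    subst hin
    rw [dif_neg (lt_irrefl n)]
    by_cases hpos : 0 < n
    · have hlt : start < n := by rcases hsn with hlt | h0 <;> omega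
      have hne := pv_slice_nonempty pages (start : Int) n (by omega)
        (by exact_mod_cast hlt) (by omega)
      rw [if_pos hne, if_pos hpos]
    · have hn0 : ((n : Nat) : Int) = 0 := by omega
      have hs0 : ((start : Nat) : Int) = 0 := by omega
      rw [if_neg hpos, hn0, hs0, pv_slice_zero]
      simp
  | succ k ih =>
    intro i start subs hn hsi hsn n st
    have hjn : i < n := by omega
    have hjp : i < pages.length := by omega
    have hjl : i < lens.length := by omega
    have hz : i < (pages.zip lens).length := by rw [List.length_zip]; omega
    have hdz : (pages.zip lens).drop i = (pages[i], lens[i]) :: (pages.zip lens).drop (i + 1) := by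
      rw [List.drop_eq_getElem_cons hz, List.getElem_zip]
    have hpre1 : (0 :: pvScan 0 (lens.take n)).getD (i + 1) 0 = (lens.take (i + 1)).sum :=
      pv_pre_getD lens n (by omega) (i + 1) (by omega)
    have hpre0 : (0 :: pvScan 0 (lens.take n)).getD start 0 = (lens.take start).sum :=
      pv_pre_getD lens n (by omega) start (by omega)
    have hPstep : (lens.take (i + 1)).sum = (lens.take i).sum + lens[i] :=
      pv_take_succ_sum lens i hjl
    simp only [st, hdz, PySem.List.enumerate_cons, List.foldl_cons]
    by_cases hcond : avg < ((lens.take i).sum - (lens.take start).sum) + lens[i]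
    · -- boundary at i: A flushes, B's search stops at i and the outer loop emits
      have hfind : pvFind (0 :: pvScan 0 (lens.take n)) n avg start i = i := by
        apply pv_find_stop
        rw [hpre1, hpre0]
        intro hc
        omega
      -- the clamped new start
      have hs2nn : (0 : Int) ≤ min (max ((i : Int) - ov) 0) (i : Int) := by omega
      set s2 : Nat := (min (max ((i : Int) - ov) 0) (i : Int)).toNat with hs2
      have hs2i : s2 ≤ i := by omega
      have hs2c : (s2 : Int) = min (max ((i : Int) - ov) 0) (i : Int) := by omega
      have hstep :
          pvStepA pages lens avg ov
            (subs, PySem.List.slice pages (some (start : Int)) (some (i : Int)),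
             (lens.take i).sum - (lens.take start).sum)
            ((i : Int), pages[i], lens[i])
          = (subs ++ [pvJoin (PySem.List.slice pages (some (start : Int)) (some (i : Int)))],
             PySem.List.slice pages (some (s2 : Int)) (some ((i : Int) + 1)),
             (lens.take (i + 1)).sum - (lens.take s2).sum) := by
        simp only [pvStepA, if_pos hcond, Prod.mk.injEq, true_and]
        refine ⟨?_, ?_⟩
        · rw [← pv_slice_min pages (max ((i : Int) - ov) 0) (i : Int) (by omega) (by omega),
            ← hs2c, pv_slice_snoc pages (s2 : Int) i (by omega) (by omega) hjp]
        · rw [pv_sum_slice lens (max ((i : Int) - ov) 0) i (by omega) (by omega)]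
          have hmm : min (max ((i : Int) - ov) 0).toNat i = s2 := by omega
          rw [hmm, hPstep]
          omega
      rw [hstep]
      have hres := ih (i + 1) s2 (subs ++ [pvJoin (PySem.List.slice pages (some (start : Int)) (some (i : Int)))])
        (by omega) (by omega) (by omega)
      simp only [Nat.cast_add, Nat.cast_one] at hres ⊢
      rw [hres]
      conv_rhs => rw [pvGroups]
      rw [hfind]
      rw [dif_pos hjn]
    · -- no boundary at i: A extends the current subset, B's search moves to i + 1
      have hfind : pvFind (0 :: pvScan 0 (lens.take n)) n avg start i
          = pvFind (0 :: pvScan 0 (lens.take n)) n avg start (i + 1) := by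
        apply pv_find_step
        rw [hpre1, hpre0]
        omega
      have hstep :
          pvStepA pages lens avg ov
            (subs, PySem.List.slice pages (some (start : Int)) (some (i : Int)),
             (lens.take i).sum - (lens.take start).sum)
            ((i : Int), pages[i], lens[i])
          = (subs, PySem.List.slice pages (some (start : Int)) (some ((i : Int) + 1)),
             (lens.take (i + 1)).sum - (lens.take start).sum) := by
        simp only [pvStepA, if_neg hcond, Prod.mk.injEq, true_and]
        refine ⟨?_, ?_⟩
        · rw [pv_slice_snoc pages (start : Int) i (by omega) (by omega) hjp]
        · rw [hPstep]; ring
      rw [hstep]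
      have hres := ih (i + 1) start subs (by omega) (by omega) hsn
      simp only [Nat.cast_add, Nat.cast_one] at hres ⊢
      rw [hres]
      exact (pv_groups_shift pages _ n avg ov subs start (i + 1) i hfind.symm)

-- ===== VERDICT (by name: the statement is the Claim_ definition above) =====
theorem page_list_to_group_text_spec : Claim_equal_page_list_to_group_text := by
  intro pages lens max_tokens ov _ _
  unfold Spec_page_list_to_group_text page_list_to_group_text page_list_to_group_text_alt
  by_cases hshort : lens.sum ≤ max_tokens
  · simp [hshort]
  · simp only [if_neg hshort]
    have hmain := pv_main pages lens (pvAvg lens.sum max_tokens) ov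
      (min pages.length lens.length) 0 0 [] (by omega) (by omega) (by omega)
    simp only [List.drop_zero, Nat.cast_zero, pv_slice_zero, List.take_zero,
      List.sum_nil, sub_zero] at hmain
    exact hmain
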